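-- pv_equiv track=rewrite | github.com/SimpleFi-finance/defi-analytics | sushiswap/position_handler.py | filterOutPositionsWithMultipleInvestsOrRedeems
-- ===== SOURCE A (Python) =====
-- def filterOutPositionsWithMultipleInvestsOrRedeems(positions):
--     """Return positions which have 1 Invest and 1 Redeem TX """
--
--     filtered_positions = {}
--     for position_id in positions.keys():
--         txs = positions[position_id]
--         invest_count = sum(map(lambda x : x['transactionType'] == 'INVEST', txs))
--         redeem_count = sum(map(lambda x : x['transactionType'] == 'REDEEM', txs))
--
--         if invest_count == 1 and redeem_count == 1:
--             filtered_positions[position_id] = positions[position_id]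
--
--     return filtered_positions
-- ===== SOURCE B (Python) =====
-- def filterOutPositionsWithMultipleInvestsOrRedeems(positions):
--     """Return positions which have 1 Invest and 1 Redeem TX """
--
--     def _exactly_one(txs, tx_type):
--         # Early-exiting search: find the first matching transaction, then
--         # verify the iterator yields no second match (no counting at all).
--         matches = (True for tx in txs if tx['transactionType'] == tx_type)
--         return next(matches, False) and not next(matches, False)
--
--     return {position_id: txs
--             for position_id, txs in positions.items()
--             if _exactly_one(txs, 'INVEST') and _exactly_one(txs, 'REDEEM')}
-- ===== Notes on version B (the rewrite author's own statement) =====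
-- stated objective: alternative
-- what changed: Replaces A's two counting scans per position with an early-exiting occurrence search (find the first matching transaction, then check there is no second match), assembled via a dict comprehension instead of an imperative loop; correct because a list has count 1 for a predicate iff it has a first match whose remainder has none.
import Mathlib
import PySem

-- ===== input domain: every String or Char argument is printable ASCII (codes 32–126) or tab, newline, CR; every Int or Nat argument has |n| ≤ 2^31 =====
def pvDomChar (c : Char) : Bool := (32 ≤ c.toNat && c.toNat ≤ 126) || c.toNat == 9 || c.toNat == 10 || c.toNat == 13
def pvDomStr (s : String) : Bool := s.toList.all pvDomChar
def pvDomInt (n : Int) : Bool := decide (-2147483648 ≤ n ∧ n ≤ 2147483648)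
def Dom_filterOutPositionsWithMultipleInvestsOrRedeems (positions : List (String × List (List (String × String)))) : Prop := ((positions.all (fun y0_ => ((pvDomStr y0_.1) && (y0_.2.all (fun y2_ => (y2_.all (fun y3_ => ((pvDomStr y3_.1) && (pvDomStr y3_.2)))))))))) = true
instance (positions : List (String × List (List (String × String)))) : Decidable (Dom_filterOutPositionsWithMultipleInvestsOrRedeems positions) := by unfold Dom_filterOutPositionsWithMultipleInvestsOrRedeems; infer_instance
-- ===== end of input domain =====

-- B replaces A's two counting scans per position by an early-exiting search for a first
-- and a forbidden second matching transaction, via a dict comprehension (alternative, not claimed faster).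

-- ===== PORT A =====
-- tx['transactionType'] (dict semantics: duplicate keys collapse, last value wins)
def pvTTa (tx : List (String × String)) : Option String :=
  (PySem.Dict.ofList tx).get? "transactionType"

def filterOutPositionsWithMultipleInvestsOrRedeems (positions : List (String × List (List (String × String)))) : List (String × List (List (String × String))) :=
  ((PySem.Dict.ofList positions).items.foldl
    (fun (acc : PySem.Dict String (List (List (String × String)))) pt =>
      let txs := pt.2
      let invest_count : Int :=
        txs.foldl (fun s tx => s + (if pvTTa tx = some "INVEST" then 1 else 0)) 0
      let redeem_count : Int :=
        txs.foldl (fun s tx => s + (if pvTTa tx = some "REDEEM" then 1 else 0)) 0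
      if invest_count = 1 ∧ redeem_count = 1 then acc.insert pt.1 pt.2 else acc)
    PySem.Dict.empty).items

-- ===== PORT B =====
-- tx['transactionType'] (same dict access, B's own helper)
def pvTTb (tx : List (String × String)) : Option String :=
  (PySem.Dict.ofList tx).get? "transactionType"

-- the generator's 'next': first match if any, together with the unconsumed rest of the list
def pvScan (t : String) : List (List (String × String)) → Option (List (List (String × String)))
  | [] => none
  | tx :: rest => if pvTTb tx = some t then some rest else pvScan t rest

-- _exactly_one: a first match exists and the remaining iterator has no further match
def pvExactlyOne (txs : List (List (String × String))) (t : String) : Bool :=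
  match pvScan t txs with
  | none => false
  | some rest => (pvScan t rest).isNone

def filterOutPositionsWithMultipleInvestsOrRedeems_alt (positions : List (String × List (List (String × String)))) : List (String × List (List (String × String))) :=
  ((PySem.Dict.ofList positions).items.foldl
    (fun (acc : PySem.Dict String (List (List (String × String)))) pt =>
      if pvExactlyOne pt.2 "INVEST" && pvExactlyOne pt.2 "REDEEM" then acc.insert pt.1 pt.2 else acc)
    PySem.Dict.empty).items

-- ===== PRECONDITION & SPEC =====
-- Python A raises KeyError when some transaction dict of a (deduplicated) position
-- lacks the key 'transactionType'; Pre_ admits exactly the inputs where every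
-- transaction carries that key.
def Pre_filterOutPositionsWithMultipleInvestsOrRedeems (positions : List (String × List (List (String × String)))) : Prop :=
  ∀ txs ∈ (PySem.Dict.ofList positions).values, ∀ tx ∈ txs, "transactionType" ∈ tx.map Prod.fst
instance (positions : List (String × List (List (String × String)))) : Decidable (Pre_filterOutPositionsWithMultipleInvestsOrRedeems positions) := by unfold Pre_filterOutPositionsWithMultipleInvestsOrRedeems; infer_instance

def pvWitness_filterOutPositionsWithMultipleInvestsOrRedeems : (List (String × List (List (String × String)))) :=
  [("p1", [[("transactionType", "INVEST")], [("transactionType", "REDEEM")]]),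
   ("p2", [[("transactionType", "INVEST")], [("transactionType", "INVEST")]])]

def Spec_filterOutPositionsWithMultipleInvestsOrRedeems (positions : List (String × List (List (String × String)))) (out : List (String × List (List (String × String)))) : Prop := out = filterOutPositionsWithMultipleInvestsOrRedeems_alt positions
instance (positions : List (String × List (List (String × String)))) (out : List (String × List (List (String × String)))) : Decidable (Spec_filterOutPositionsWithMultipleInvestsOrRedeems positions out) := by unfold Spec_filterOutPositionsWithMultipleInvestsOrRedeems; infer_instance

-- ===== CLAIM (what is proved, stated in full; the proofs are below) =====
def Claim_equal_filterOutPositionsWithMultipleInvestsOrRedeems : Prop := ∀ (positions : List (String × List (List (String × String)))), Dom_filterOutPositionsWithMultipleInvestsOrRedeems positions → Pre_filterOutPositionsWithMultipleInvestsOrRedeems positions → Spec_filterOutPositionsWithMultipleInvestsOrRedeems positions (filterOutPositionsWithMultipleInvestsOrRedeems positions)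

-- ===== LEMMAS AND PROOFS =====

theorem pvFoldlCong {α β : Type} {f g : α → β → α} (h : ∀ a b, f a b = g a b) :
    ∀ (l : List β) (init : α), l.foldl f init = l.foldl g init := by
  intro l
  induction l with
  | nil => intro init; rfl
  | cons hd tl ih => intro init; simp only [List.foldl_cons, h, ih]

-- A's counting fold is the countP of the matching predicate
theorem pvCount_eq (t : String) (txs : List (List (String × String))) (a : Int) :
    txs.foldl (fun s tx => s + (if pvTTa tx = some t then 1 else 0)) a
      = a + (txs.countP (fun tx => pvTTa tx == some t) : Int) := by
  induction txs generalizing a with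
  | nil => simp
  | cons hd tl ih =>
    simp only [List.foldl_cons, List.countP_cons, ih]
    by_cases h : pvTTa hd = some t
    · simp [h]; ring
    · simp [h]

-- no first match ↔ count 0
theorem pvScan_none (t : String) (txs : List (List (String × String))) :
    pvScan t txs = none ↔ txs.countP (fun tx => pvTTa tx == some t) = 0 := by
  induction txs with
  | nil => simp [pvScan]
  | cons hd tl ih =>
    simp only [pvScan, List.countP_cons]
    by_cases h : pvTTb hd = some t
    · have h' : pvTTa hd = some t := h
      simp [h, h']
    · have h' : ¬ pvTTa hd = some t := h
      simp [h, h', ih]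

-- a first match splits the count: 1 + count of the rest
theorem pvScan_some (t : String) (txs rest : List (List (String × String)))
    (h : pvScan t txs = some rest) :
    txs.countP (fun tx => pvTTa tx == some t)
      = 1 + rest.countP (fun tx => pvTTa tx == some t) := by
  induction txs generalizing rest with
  | nil => simp [pvScan] at h
  | cons hd tl ih =>
    simp only [pvScan] at h
    by_cases hm : pvTTb hd = some t
    · have h' : pvTTa hd = some t := hm
      rw [if_pos hm] at h
      cases h
      simp [h']; omega
    · have h' : ¬ pvTTa hd = some t := hm
      rw [if_neg hm] at h
      simp [h', ih rest h]

-- B's early-exiting search decides exactly 'count = 1'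
theorem pvExactlyOne_iff (t : String) (txs : List (List (String × String))) :
    pvExactlyOne txs t = true ↔ txs.countP (fun tx => pvTTa tx == some t) = 1 := by
  unfold pvExactlyOne
  cases hs : pvScan t txs with
  | none =>
    rw [pvScan_none] at hs
    simp [hs]
  | some rest =>
    rw [pvScan_some t txs rest hs]
    simp [Option.isNone_iff_eq_none, pvScan_none]

theorem ports_agree (positions : List (String × List (List (String × String)))) :
    filterOutPositionsWithMultipleInvestsOrRedeems positions
      = filterOutPositionsWithMultipleInvestsOrRedeems_alt positions := by
  unfold filterOutPositionsWithMultipleInvestsOrRedeems filterOutPositionsWithMultipleInvestsOrRedeems_alt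
  congr 1
  apply pvFoldlCong
  intro acc pt
  have hcond : ((pt.2.foldl (fun s tx => s + (if pvTTa tx = some "INVEST" then 1 else 0)) (0:Int)) = 1
        ∧ (pt.2.foldl (fun s tx => s + (if pvTTa tx = some "REDEEM" then 1 else 0)) (0:Int)) = 1)
      ↔ (pvExactlyOne pt.2 "INVEST" && pvExactlyOne pt.2 "REDEEM") = true := by
    rw [pvCount_eq, pvCount_eq, Bool.and_eq_true, pvExactlyOne_iff, pvExactlyOne_iff]
    constructor
    · rintro ⟨h1, h2⟩; omega
    · rintro ⟨h1, h2⟩; omega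
  simp only []
  rw [if_congr hcond rfl rfl]

-- ===== VERDICT (by name: the statement is the Claim_ definition above) =====
theorem filterOutPositionsWithMultipleInvestsOrRedeems_spec : Claim_equal_filterOutPositionsWithMultipleInvestsOrRedeems := by
  intro positions _ _
  exact ports_agree positions
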